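-- pv_equiv track=rewrite | github.com/PurvaTransvision/Ongoing-Monitoring | app.py | date_matching
-- ===== SOURCE A (Python) =====
-- def date_matching(input_years, year_list, match_scores_date, threshold_years=2):
--
--     if not year_list:
--         return match_scores_date.get("Missing")
--     year_list = [year for year in year_list if year is not None]  # Filter out None values
--     if not input_years or not year_list:
--         return match_scores_date.get("Missing")
--     max_scores = []
--     for request_year in input_years:
--         if request_year is not None:
--             for year_entry in year_list:
--                 if year_entry is not None:
--                     difference_years = abs(year_entry - request_year)
--                     match_score = match_scores_date.get("Match", 0) if difference_years == 0 else 0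
--                     match_score = match_scores_date.get("WeakMatch", 0) if 0 < difference_years <= threshold_years else match_score
--                     match_score = match_scores_date.get("Mismatch", 0) if difference_years > threshold_years else match_score
--                     max_scores.append(match_score)
--     max_match_score = max(max_scores) if max_scores else 0
--     return max_match_score
-- ===== SOURCE B (Python) =====
-- def date_matching(input_years, year_list, match_scores_date, threshold_years=2):
--     if not year_list:
--         return match_scores_date.get("Missing")
--     ys = sorted(y for y in year_list if y is not None)
--     if not input_years or not ys:
--         return match_scores_date.get("Missing")
--     rs = [r for r in input_years if r is not None]
--     if not rs:
--         return 0
--     t = threshold_years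
--     n = len(ys)
--
--     def count_le(x):
--         # number of years <= x, by binary search on the sorted list
--         lo, hi = 0, n
--         while lo < hi:
--             mid = (lo + hi) // 2
--             if ys[mid] <= x:
--                 lo = mid + 1
--             else:
--                 hi = mid
--         return lo
--
--     lo_y, hi_y = ys[0], ys[-1]
--     has_match = t >= 0 and any(count_le(r) > count_le(r - 1) for r in rs)
--     has_weak = t >= 1 and any(count_le(r + t) > count_le(r)
--                               or count_le(r - 1) > count_le(r - t - 1) for r in rs)
--     has_mismatch = any(hi_y - r > t or r - lo_y > t for r in rs)
--     candidates = []
--     if has_match: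
--         candidates.append(match_scores_date.get("Match", 0))
--     if has_weak:
--         candidates.append(match_scores_date.get("WeakMatch", 0))
--     if has_mismatch:
--         candidates.append(match_scores_date.get("Mismatch", 0))
--     return max(candidates)
-- ===== Notes on version B (the rewrite author's own statement) =====
-- stated objective: faster
-- what changed: Instead of scoring every (input_year, year) pair and taking the max of n*m scores, B sorts the years once and decides with O(log m) binary-search rank queries per input year which of the three score categories (Match/WeakMatch/Mismatch) is achievable at all, then returns the max over the achievable categories' scores.
import Mathlib
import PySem

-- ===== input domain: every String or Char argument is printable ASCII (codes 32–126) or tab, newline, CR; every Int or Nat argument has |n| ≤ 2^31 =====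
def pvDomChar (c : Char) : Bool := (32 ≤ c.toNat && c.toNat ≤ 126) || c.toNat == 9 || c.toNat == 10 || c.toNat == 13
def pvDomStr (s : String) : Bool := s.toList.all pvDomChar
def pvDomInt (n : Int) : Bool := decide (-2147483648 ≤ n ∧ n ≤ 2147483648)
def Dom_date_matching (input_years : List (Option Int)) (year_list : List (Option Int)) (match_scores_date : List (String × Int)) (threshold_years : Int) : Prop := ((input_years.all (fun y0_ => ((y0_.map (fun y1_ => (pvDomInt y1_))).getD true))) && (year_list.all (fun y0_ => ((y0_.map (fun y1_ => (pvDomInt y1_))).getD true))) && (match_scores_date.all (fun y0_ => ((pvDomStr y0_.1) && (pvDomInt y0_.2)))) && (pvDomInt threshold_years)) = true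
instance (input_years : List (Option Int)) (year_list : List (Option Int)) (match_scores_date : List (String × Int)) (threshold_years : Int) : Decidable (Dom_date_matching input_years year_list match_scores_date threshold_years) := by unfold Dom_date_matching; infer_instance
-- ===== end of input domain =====

-- B replaces A's score-per-pair nested loop by one sort plus binary-search rank queries that decide
-- which score categories are achievable, then maxes over those categories' scores (measured faster, asymptotic).


-- ===== PORT A =====
-- Literal port of A. 'year_list = [year for year in year_list if year is not None]' is filterMap id;
-- the inner 'if year_entry is not None' is then always true (the filtered list holds Ints), so it is folded away.
def date_matching (input_years : List (Option Int)) (year_list : List (Option Int)) (match_scores_date : List (String × Int)) (threshold_years : Int) : Option Int :=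
  if year_list.isEmpty then PySem.Dict.get? ⟨match_scores_date⟩ "Missing"
  else
    let yl : List Int := year_list.filterMap id
    if input_years.isEmpty || yl.isEmpty then PySem.Dict.get? ⟨match_scores_date⟩ "Missing"
    else
      let max_scores : List Int := input_years.foldl (fun acc ry =>
        match ry with
        | none => acc
        | some r => yl.foldl (fun acc2 y =>
            let d : Int := |y - r|
            let ms : Int := if d = 0 then PySem.Dict.getD ⟨match_scores_date⟩ "Match" 0 else 0
            let ms : Int := if 0 < d ∧ d ≤ threshold_years then PySem.Dict.getD ⟨match_scores_date⟩ "WeakMatch" 0 else ms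
            let ms : Int := if threshold_years < d then PySem.Dict.getD ⟨match_scores_date⟩ "Mismatch" 0 else ms
            acc2 ++ [ms]) acc) []
      if max_scores.isEmpty then some 0 else PySem.List.max? max_scores (fun v => v)

-- ===== PORT B =====
-- B's hand-written binary search 'count_le' (while lo < hi). lo, hi stay in [0, len ys], so Nat indices
-- and Nat floor division are exact for Python's nonnegative ints and '//' here.
def pvCountLE (ys : List Int) (x : Int) (lo hi : Nat) : Nat :=
  if _h : lo < hi then
    let mid := (lo + hi) / 2
    match ys[mid]? with
    | some v => if v ≤ x then pvCountLE ys x (mid + 1) hi else pvCountLE ys x lo mid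
    | none => lo   -- unreachable while hi ≤ len ys
  else lo
termination_by hi - lo
decreasing_by all_goals omega

def date_matching_alt (input_years : List (Option Int)) (year_list : List (Option Int)) (match_scores_date : List (String × Int)) (threshold_years : Int) : Option Int :=
  if year_list.isEmpty then PySem.Dict.get? ⟨match_scores_date⟩ "Missing"
  else
    let ys : List Int := PySem.List.sorted (year_list.filterMap id) (fun y => y)
    if input_years.isEmpty || ys.isEmpty then PySem.Dict.get? ⟨match_scores_date⟩ "Missing"
    else
      let rs : List Int := input_years.filterMap id
      if rs.isEmpty then some 0
      else
        let t := threshold_years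
        let cnt : Int → Nat := fun x => pvCountLE ys x 0 ys.length
        let loY : Int := ys.headD 0      -- ys[0], ys nonempty here
        let hiY : Int := ys.getLastD 0   -- ys[-1], ys nonempty here
        let hasM : Bool := decide (0 ≤ t) && rs.any (fun r => cnt r > cnt (r - 1))
        let hasW : Bool := decide (1 ≤ t) && rs.any (fun r => cnt (r + t) > cnt r || cnt (r - 1) > cnt (r - t - 1))
        let hasX : Bool := rs.any (fun r => hiY - r > t || r - loY > t)
        let cands : List Int :=
          (if hasM then [PySem.Dict.getD ⟨match_scores_date⟩ "Match" 0] else []) ++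
          (if hasW then [PySem.Dict.getD ⟨match_scores_date⟩ "WeakMatch" 0] else []) ++
          (if hasX then [PySem.Dict.getD ⟨match_scores_date⟩ "Mismatch" 0] else [])
        PySem.List.max? cands (fun v => v)   -- max(candidates); cands is provably nonempty here

-- ===== PRECONDITION & SPEC =====
def Spec_date_matching (input_years : List (Option Int)) (year_list : List (Option Int)) (match_scores_date : List (String × Int)) (threshold_years : Int) (out : Option Int) : Prop := out = date_matching_alt input_years year_list match_scores_date threshold_years
instance (input_years : List (Option Int)) (year_list : List (Option Int)) (match_scores_date : List (String × Int)) (threshold_years : Int) (out : Option Int) : Decidable (Spec_date_matching input_years year_list match_scores_date threshold_years out) := by unfold Spec_date_matching; infer_instance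

-- ===== CLAIM (what is proved, stated in full; the proofs are below) =====
def Claim_equal_date_matching : Prop := ∀ (input_years : List (Option Int)) (year_list : List (Option Int)) (match_scores_date : List (String × Int)) (threshold_years : Int), Dom_date_matching input_years year_list match_scores_date threshold_years → Spec_date_matching input_years year_list match_scores_date threshold_years (date_matching input_years year_list match_scores_date threshold_years)


-- ===== LEMMAS AND PROOFS =====

-- the value A's inner loop appends for the pair (r, y)
def pvScoreOf (match_scores_date : List (String × Int)) (t r y : Int) : Int :=
  let d : Int := |y - r|
  let ms : Int := if d = 0 then PySem.Dict.getD ⟨match_scores_date⟩ "Match" 0 else 0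
  let ms : Int := if 0 < d ∧ d ≤ t then PySem.Dict.getD ⟨match_scores_date⟩ "WeakMatch" 0 else ms
  let ms : Int := if t < d then PySem.Dict.getD ⟨match_scores_date⟩ "Mismatch" 0 else ms
  ms

-- canonical three-way form of A's reassignment chain
lemma pvScoreOf_cases (msd : List (String × Int)) (t r y : Int) :
    pvScoreOf msd t r y =
      if t < |y - r| then PySem.Dict.getD ⟨msd⟩ "Mismatch" 0
      else if 0 < |y - r| ∧ |y - r| ≤ t then PySem.Dict.getD ⟨msd⟩ "WeakMatch" 0
      else PySem.Dict.getD ⟨msd⟩ "Match" 0 := by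
  have hd : (0:Int) ≤ |y - r| := abs_nonneg _
  simp only [pvScoreOf]
  split_ifs <;> first | rfl | omega

-- A's nested loop builds exactly the flatMap of per-pair scores
lemma foldA_gen (g : Int → Int → Int) (yl : List Int) :
    ∀ (iy : List (Option Int)) (acc : List Int),
      iy.foldl (fun acc ry =>
        match ry with
        | none => acc
        | some r => yl.foldl (fun acc2 y => acc2 ++ [g r y]) acc) acc
      = acc ++ (iy.filterMap id).flatMap (fun r => yl.map (g r)) := by
  intro iy
  induction iy with
  | nil => intro acc; simp
  | cons hd tl ih =>
    intro acc
    rw [List.foldl_cons]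
    cases hd with
    | none => exact ih acc
    | some r =>
      show List.foldl _ (List.foldl (fun acc2 y => acc2 ++ [g r y]) acc yl) tl = _
      rw [PySem.List.foldl_append_singleton_eq_map, ih]
      simp [List.flatMap_cons, List.append_assoc]

-- A's nested loop builds exactly the flatMap of per-pair scores
lemma foldA (msd : List (String × Int)) (t : Int) (yl : List Int)
    (iy : List (Option Int)) (acc : List Int) :
      iy.foldl (fun acc ry =>
        match ry with
        | none => acc
        | some r => yl.foldl (fun acc2 y =>
            let d : Int := |y - r|
            let ms : Int := if d = 0 then PySem.Dict.getD ⟨msd⟩ "Match" 0 else 0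
            let ms : Int := if 0 < d ∧ d ≤ t then PySem.Dict.getD ⟨msd⟩ "WeakMatch" 0 else ms
            let ms : Int := if t < d then PySem.Dict.getD ⟨msd⟩ "Mismatch" 0 else ms
            acc2 ++ [ms]) acc) acc
      = acc ++ (iy.filterMap id).flatMap (fun r => yl.map (pvScoreOf msd t r)) :=
  foldA_gen (pvScoreOf msd t) yl iy acc

-- counting characterization of a split point
lemma countP_of_split (p : Int → Bool) :
    ∀ (ys : List Int) (k : Nat), k ≤ ys.length →
      (∀ j (hj : j < ys.length), j < k → p ys[j] = true) →
      (∀ j (hj : j < ys.length), k ≤ j → p ys[j] = false) →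
      ys.countP p = k := by
  intro ys
  induction ys with
  | nil =>
    intro k hk _ _
    simp only [List.length_nil, Nat.le_zero] at hk
    subst hk
    simp
  | cons y tl ih =>
    intro k hk h1 h2
    cases k with
    | zero =>
      rw [List.countP_eq_zero.mpr]
      intro a ha
      rcases List.mem_iff_getElem.mp ha with ⟨j, hj, rfl⟩
      simpa using h2 j hj (Nat.zero_le _)
    | succ k' =>
      have hy : p y = true := by simpa using h1 0 (by simp) (Nat.succ_pos _)
      have hrec := ih k' (by simp only [List.length_cons] at hk; omega)
        (fun j hj hjk => by simpa using h1 (j+1) (by simpa using Nat.succ_lt_succ hj) (Nat.succ_lt_succ hjk))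
        (fun j hj hjk => by simpa using h2 (j+1) (by simpa using Nat.succ_lt_succ hj) (Nat.succ_le_succ hjk))
      simp [hy, hrec]

-- binary-search invariant
lemma pvCountLE_inv (ys : List Int) (x : Int)
    (hs : ∀ i j (hi : i < ys.length) (hj : j < ys.length), i ≤ j → ys[i] ≤ ys[j]) :
    ∀ (n lo hi : Nat), hi - lo ≤ n → lo ≤ hi → hi ≤ ys.length →
      (∀ j (hj : j < ys.length), j < lo → ys[j] ≤ x) →
      (∀ j (hj : j < ys.length), hi ≤ j → x < ys[j]) →
      pvCountLE ys x lo hi ≤ ys.length ∧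
      (∀ j (hj : j < ys.length), j < pvCountLE ys x lo hi → ys[j] ≤ x) ∧
      (∀ j (hj : j < ys.length), pvCountLE ys x lo hi ≤ j → x < ys[j]) := by
  intro n
  induction n with
  | zero =>
    intro lo hi hfuel hlohi hhi hlow hhigh
    have : lo = hi := by omega
    subst this
    rw [pvCountLE]
    simp only [lt_irrefl, dite_false]
    exact ⟨by omega, fun j hj hjk => hlow j hj hjk, fun j hj hjk => hhigh j hj hjk⟩
  | succ n ih =>
    intro lo hi hfuel hlohi hhi hlow hhigh
    rw [pvCountLE]
    by_cases h : lo < hi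
    · simp only [h, dite_true]
      have hmid : (lo + hi) / 2 < ys.length := by omega
      rw [List.getElem?_eq_getElem hmid]
      by_cases hv : ys[(lo + hi) / 2] ≤ x
      · simp only [hv, if_true]
        exact ih ((lo + hi) / 2 + 1) hi (by omega) (by omega) hhi
          (fun j hj hjk => le_trans (hs j ((lo + hi) / 2) hj hmid (by omega)) hv)
          hhigh
      · simp only [hv, if_false]
        exact ih lo ((lo + hi) / 2) (by omega) (by omega) (by omega) hlow
          (fun j hj hjk => lt_of_lt_of_le (lt_of_not_ge hv) (hs ((lo + hi) / 2) j hmid hj hjk))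
    · simp only [h, dite_false]
      have : lo = hi := by omega
      subst this
      exact ⟨by omega, fun j hj hjk => hlow j hj hjk, fun j hj hjk => hhigh j hj (by omega)⟩

-- B's count_le computes the rank: the number of years ≤ x
lemma pvCountLE_eq_countP (ys : List Int) (x : Int) (hs : ys.Pairwise (· ≤ ·)) :
    pvCountLE ys x 0 ys.length = ys.countP (fun y => decide (y ≤ x)) := by
  have hs' : ∀ i j (hi : i < ys.length) (hj : j < ys.length), i ≤ j → ys[i] ≤ ys[j] := by
    intro i j hi hj hij
    rcases Nat.lt_or_ge i j with h | h
    · exact (List.pairwise_iff_getElem.mp hs) i j hi hj h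
    · have : i = j := by omega
      subst this; rfl
  obtain ⟨hk, h1, h2⟩ := pvCountLE_inv ys x hs' ys.length 0 ys.length (by omega) (by omega) le_rfl
    (fun j hj hjk => by omega) (fun j hj hjk => by omega)
  exact (countP_of_split _ ys _ hk
    (fun j hj hjk => by simpa using h1 j hj hjk)
    (fun j hj hjk => by simpa using h2 j hj hjk)).symm

-- rank difference detects an element in the half-open interval (a, b]
lemma countP_le_split (a b : Int) (hab : a ≤ b) :
    ∀ (ys : List Int),
      ys.countP (fun y => decide (y ≤ b)) =
        ys.countP (fun y => decide (y ≤ a)) + ys.countP (fun y => decide (a < y ∧ y ≤ b)) := by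
  intro ys
  induction ys with
  | nil => simp
  | cons y tl ih =>
    simp only [List.countP_cons, ih]
    by_cases h1 : y ≤ a <;> by_cases h2 : y ≤ b <;> by_cases h3 : a < y <;>
      simp [h1, h2, h3] <;> omega

lemma cnt_lt_iff (ys : List Int) (hs : ys.Pairwise (· ≤ ·)) (a b : Int) (hab : a ≤ b) :
    (pvCountLE ys a 0 ys.length < pvCountLE ys b 0 ys.length) ↔ ∃ y ∈ ys, a < y ∧ y ≤ b := by
  rw [pvCountLE_eq_countP ys a hs, pvCountLE_eq_countP ys b hs, countP_le_split a b hab ys]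
  rw [show (∃ y ∈ ys, a < y ∧ y ≤ b) ↔ 0 < ys.countP (fun y => decide (a < y ∧ y ≤ b)) by
    rw [List.countP_pos_iff]; simp]
  omega

-- Python's max over two nonempty Int lists with the same members agree
lemma max?_eq_of_mem_iff (l1 l2 : List Int) (hne : l1 ≠ [])
    (h : ∀ x : Int, x ∈ l1 ↔ x ∈ l2) :
    PySem.List.max? l1 (fun v => v) = PySem.List.max? l2 (fun v => v) := by
  have hne2 : l2 ≠ [] := by
    rcases List.exists_mem_of_ne_nil l1 hne with ⟨x, hx⟩
    exact List.ne_nil_of_mem ((h x).mp hx)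
  cases hm1 : PySem.List.max? l1 (fun v => v) with
  | none => exact absurd ((PySem.List.max?_eq_none_iff l1 (fun v => v)).mp hm1) hne
  | some m1 =>
    cases hm2 : PySem.List.max? l2 (fun v => v) with
    | none => exact absurd ((PySem.List.max?_eq_none_iff l2 (fun v => v)).mp hm2) hne2
    | some m2 =>
      have h12 : m1 ≤ m2 := PySem.List.max?_isMax hm2 m1 ((h m1).mp (PySem.List.max?_mem hm1))
      have h21 : m2 ≤ m1 := PySem.List.max?_isMax hm1 m2 ((h m2).mpr (PySem.List.max?_mem hm2))
      exact congrArg some (le_antisymm h12 h21)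

lemma mem_cand_iff (bM bW bX : Bool) (sM sW sX x : Int) :
    (x ∈ ((if bM then [sM] else []) ++ (if bW then [sW] else [])) ++ (if bX then [sX] else [])) ↔
      ((bM = true ∧ x = sM) ∨ (bW = true ∧ x = sW) ∨ (bX = true ∧ x = sX)) := by
  cases bM <;> cases bW <;> cases bX <;> simp

-- ===== VERDICT (by name: the statement is the Claim_ definition above) =====
theorem date_matching_spec : Claim_equal_date_matching := by
  intro iy yl0 msd t _dom
  unfold Spec_date_matching
  by_cases h0 : yl0.isEmpty = true
  · simp only [date_matching, date_matching_alt, h0, if_true]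
  · have h0' : yl0.isEmpty = false := Bool.eq_false_iff.mpr h0
    have hys : (PySem.List.sorted (yl0.filterMap id) (fun y => y)).isEmpty = (yl0.filterMap id).isEmpty := by
      rw [Bool.eq_iff_iff, List.isEmpty_iff, List.isEmpty_iff]
      exact PySem.List.sorted_eq_nil_iff _ _ _
    by_cases h1 : (iy.isEmpty || (yl0.filterMap id).isEmpty) = true
    · simp only [date_matching, date_matching_alt, h0', Bool.false_eq_true, if_false, hys, h1, if_true]
    · have h1' : (iy.isEmpty || (yl0.filterMap id).isEmpty) = false := Bool.eq_false_iff.mpr h1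
      have h1'' : (iy.isEmpty || (PySem.List.sorted (yl0.filterMap id) (fun y => y)).isEmpty) = false := by
        rw [hys]; exact h1'
      have hA : date_matching iy yl0 msd t =
          (if ((iy.filterMap id).flatMap (fun r => (yl0.filterMap id).map (pvScoreOf msd t r))).isEmpty then some 0
           else PySem.List.max? ((iy.filterMap id).flatMap (fun r => (yl0.filterMap id).map (pvScoreOf msd t r))) (fun v => v)) := by
        simp only [date_matching, h0', Bool.false_eq_true, if_false, h1']
        rw [foldA msd t (yl0.filterMap id) iy [], List.nil_append]
      rw [hA]
      by_cases h2 : (iy.filterMap id).isEmpty = true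
      · have h2l : iy.filterMap id = [] := List.isEmpty_iff.mp h2
        simp only [date_matching_alt, h0', Bool.false_eq_true, if_false, h1'', if_true, h2l,
          List.flatMap_nil, List.isEmpty_nil]
      · have h2' : (iy.filterMap id).isEmpty = false := Bool.eq_false_iff.mpr h2
        simp only [date_matching_alt, h0', Bool.false_eq_true, if_false, h1'', h2']
        have hylne : yl0.filterMap id ≠ [] := by
          intro hc; rw [hc] at h1'; simp at h1'
        have hrsne : iy.filterMap id ≠ [] := fun hc => by rw [hc] at h2'; simp at h2'
        have hLne : (iy.filterMap id).flatMap (fun r => (yl0.filterMap id).map (pvScoreOf msd t r)) ≠ [] := by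
          obtain ⟨r0, rs', hrseq⟩ := List.exists_cons_of_ne_nil hrsne
          obtain ⟨y0, yl', hyleq⟩ := List.exists_cons_of_ne_nil hylne
          rw [hrseq, List.flatMap_cons, hyleq, List.map_cons, List.cons_append]
          exact List.cons_ne_nil _ _
        rw [if_neg (by simpa [List.isEmpty_iff] using hLne)]
        apply max?_eq_of_mem_iff _ _ hLne
        intro x
        set yl : List Int := List.filterMap id yl0 with hyldef
        set ys : List Int := PySem.List.sorted yl (fun y => y) with hysdef
        set rs : List Int := List.filterMap id iy with hrsdef
        have hsorted : ys.Pairwise (· ≤ ·) := by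
          have h := PySem.List.sorted_pairwise yl (fun y => y)
          rw [← hysdef] at h
          exact h
        have hmem : ∀ y : Int, y ∈ ys ↔ y ∈ yl := by
          intro y
          rw [hysdef]
          exact PySem.List.mem_sorted _ _ _ _
        have hcnt : ∀ a b : Int, a ≤ b →
            ((pvCountLE ys a 0 ys.length < pvCountLE ys b 0 ys.length) ↔ ∃ y ∈ yl, a < y ∧ y ≤ b) := by
          intro a b hab
          rw [cnt_lt_iff ys hsorted a b hab]
          exact ⟨fun ⟨y, hy, h⟩ => ⟨y, (hmem y).mp hy, h⟩, fun ⟨y, hy, h⟩ => ⟨y, (hmem y).mpr hy, h⟩⟩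
        have hysne : ys ≠ [] := by
          rw [hysdef]
          intro hc
          exact hylne ((PySem.List.sorted_eq_nil_iff _ _ _).mp hc)
        have hheadmem : ys.headD 0 ∈ yl := by
          obtain ⟨yh, ytl, hyscons⟩ := List.exists_cons_of_ne_nil hysne
          refine (hmem _).mp ?_
          rw [hyscons]
          simp
        have hheadmin : ∀ y ∈ yl, ys.headD 0 ≤ y := by
          obtain ⟨yh, ytl, hyscons⟩ := List.exists_cons_of_ne_nil hysne
          intro y hy
          have hy' : y ∈ ys := (hmem y).mpr hy
          rw [hyscons] at hy' ⊢
          simp only [List.headD_cons]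
          rcases List.mem_cons.mp hy' with h | h
          · exact le_of_eq h.symm
          · exact (List.pairwise_cons.mp (hyscons ▸ hsorted)).1 y h
        have hlastD : ys.getLastD 0 = ys.getLast hysne := by
          rw [List.getLastD_eq_getLast?, List.getLast?_eq_some_getLast hysne]
          rfl
        have hlastmem : ys.getLastD 0 ∈ yl := by
          rw [hlastD]
          exact (hmem _).mp (List.getLast_mem hysne)
        have hlastmax : ∀ y ∈ yl, y ≤ ys.getLastD 0 := by
          intro y hy
          have hy' : y ∈ ys := (hmem y).mpr hy
          obtain ⟨i, hi, rfl⟩ := List.mem_iff_getElem.mp hy'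
          have hlen : ys.length - 1 < ys.length := by
            have : ys.length ≠ 0 := fun hc => hysne (List.eq_nil_of_length_eq_zero hc)
            omega
          have hgl : ys.getLastD 0 = ys[ys.length - 1] := by
            rw [hlastD, List.getLast_eq_getElem]
          rw [hgl]
          rcases Nat.lt_or_ge i (ys.length - 1) with h | h
          · exact List.pairwise_iff_getElem.mp hsorted i (ys.length - 1) hi hlen h
          · have : i = ys.length - 1 := by omega
            subst this
            exact le_rfl
        have hM : (decide (0 ≤ t) && rs.any (fun r =>
              pvCountLE ys r 0 ys.length > pvCountLE ys (r - 1) 0 ys.length)) = true ↔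
            (∃ r ∈ rs, ∃ y ∈ yl, y = r ∧ 0 ≤ t) := by
          simp only [Bool.and_eq_true, decide_eq_true_eq, List.any_eq_true, gt_iff_lt]
          constructor
          · rintro ⟨ht, r, hr, hlt⟩
            obtain ⟨y, hy, hy1, hy2⟩ := (hcnt (r - 1) r (by omega)).mp hlt
            exact ⟨r, hr, y, hy, by omega, ht⟩
          · rintro ⟨r, hr, y, hy, hyr, ht⟩
            exact ⟨ht, r, hr, (hcnt (r - 1) r (by omega)).mpr ⟨y, hy, by omega, by omega⟩⟩
        have hW : (decide (1 ≤ t) && rs.any (fun r =>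
              pvCountLE ys (r + t) 0 ys.length > pvCountLE ys r 0 ys.length ||
              pvCountLE ys (r - 1) 0 ys.length > pvCountLE ys (r - t - 1) 0 ys.length)) = true ↔
            (∃ r ∈ rs, ∃ y ∈ yl, 0 < |y - r| ∧ |y - r| ≤ t) := by
          simp only [Bool.and_eq_true, decide_eq_true_eq, List.any_eq_true, Bool.or_eq_true,
            gt_iff_lt]
          constructor
          · rintro ⟨ht, r, hr, hc | hc⟩
            · obtain ⟨y, hy, hy1, hy2⟩ := (hcnt r (r + t) (by omega)).mp hc
              have ha : |y - r| = y - r := abs_of_nonneg (by omega)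
              exact ⟨r, hr, y, hy, by omega, by omega⟩
            · obtain ⟨y, hy, hy1, hy2⟩ := (hcnt (r - t - 1) (r - 1) (by omega)).mp hc
              have ha : |y - r| = -(y - r) := abs_of_neg (by omega)
              exact ⟨r, hr, y, hy, by omega, by omega⟩
          · rintro ⟨r, hr, y, hy, h1, h2⟩
            have ht : 1 ≤ t := by omega
            refine ⟨ht, r, hr, ?_⟩
            rcases abs_cases (y - r) with ⟨he, hsgn⟩ | ⟨he, hsgn⟩
            · exact Or.inl ((hcnt r (r + t) (by omega)).mpr ⟨y, hy, by omega, by omega⟩)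
            · exact Or.inr ((hcnt (r - t - 1) (r - 1) (by omega)).mpr ⟨y, hy, by omega, by omega⟩)
        have hX : (rs.any (fun r =>
              ys.getLastD 0 - r > t || r - ys.headD 0 > t)) = true ↔
            (∃ r ∈ rs, ∃ y ∈ yl, t < |y - r|) := by
          simp only [List.any_eq_true, Bool.or_eq_true, decide_eq_true_eq, gt_iff_lt]
          constructor
          · rintro ⟨r, hr, hc | hc⟩
            · exact ⟨r, hr, ys.getLastD 0, hlastmem,
                by have := le_abs_self (ys.getLastD 0 - r); omega⟩
            · refine ⟨r, hr, ys.headD 0, hheadmem, ?_⟩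
              have h := le_abs_self (r - ys.headD 0)
              rw [abs_sub_comm] at h
              omega
          · rintro ⟨r, hr, y, hy, hd⟩
            refine ⟨r, hr, ?_⟩
            rcases abs_cases (y - r) with ⟨he, hsgn⟩ | ⟨he, hsgn⟩
            · have := hlastmax y hy
              exact Or.inl (by omega)
            · have := hheadmin y hy
              exact Or.inr (by omega)
        have hLchar : x ∈ rs.flatMap (fun r => yl.map (pvScoreOf msd t r)) ↔
            (((∃ r ∈ rs, ∃ y ∈ yl, y = r ∧ 0 ≤ t) ∧ x = PySem.Dict.getD ⟨msd⟩ "Match" 0) ∨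
             ((∃ r ∈ rs, ∃ y ∈ yl, 0 < |y - r| ∧ |y - r| ≤ t) ∧ x = PySem.Dict.getD ⟨msd⟩ "WeakMatch" 0) ∨
             ((∃ r ∈ rs, ∃ y ∈ yl, t < |y - r|) ∧ x = PySem.Dict.getD ⟨msd⟩ "Mismatch" 0)) := by
          simp only [List.mem_flatMap, List.mem_map]
          constructor
          · rintro ⟨r, hr, y, hy, rfl⟩
            rw [pvScoreOf_cases]
            have h0d := abs_nonneg (y - r)
            split_ifs with hx hw
            · exact Or.inr (Or.inr ⟨⟨r, hr, y, hy, hx⟩, rfl⟩)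
            · exact Or.inr (Or.inl ⟨⟨r, hr, y, hy, hw⟩, rfl⟩)
            · have h1 : |y - r| = 0 := by omega
              have h2 : y = r := by
                have := abs_eq_zero.mp h1
                omega
              exact Or.inl ⟨⟨r, hr, y, hy, h2, by omega⟩, rfl⟩
          · rintro (⟨⟨r, hr, y, hy, hyr, ht⟩, rfl⟩ | ⟨⟨r, hr, y, hy, hw⟩, rfl⟩ | ⟨⟨r, hr, y, hy, hx⟩, rfl⟩)
            · refine ⟨r, hr, y, hy, ?_⟩
              rw [pvScoreOf_cases]
              have hd : |y - r| = 0 := by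
                rw [abs_eq_zero]
                omega
              rw [if_neg (by omega), if_neg (by omega)]
            · refine ⟨r, hr, y, hy, ?_⟩
              rw [pvScoreOf_cases, if_neg (by omega), if_pos hw]
            · refine ⟨r, hr, y, hy, ?_⟩
              rw [pvScoreOf_cases, if_pos hx]
        rw [hLchar, mem_cand_iff, hM, hW, hX]
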